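-- pv_equiv track=rewrite | github.com/isk02206/python | informatics/Tutor 2017-2018 (2)/Equidivision.py | equidivision
-- ===== SOURCE A (Python) =====
-- def groups(grid):
--
--     position, counter = {}, 0
--
--     for row in grid:
--         for number in range(len(row)):
--             index = (counter, number)
--
--             if row[number] in position:
--                 position[row[number]].add(index)
--             else:
--                 position[row[number]] =  position.get(index, {index})
--
--         counter += 1
--
--     return position
--
-- def connected(points):
--
--     original = len(points)
--     connected = {points.pop()}
--
--     while points:
--         check = set()
--
--         for connected_point in connected:
--             (x, y) = connected_point
--             check.add((x + 1, y)), check.add((x - 1, y))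
--             check.add((x, y + 1)), check.add((x, y - 1))
--
--         for point in points:
--             if point in check:
--                 connected.add(point)
--                 break
--
--         points.remove(point)
--
--     if len(connected) == original:
--         return True
--
--     else:
--         return False
--
-- def equidivision(grid):
--
--     value_dic, check = groups(grid), set()
--     positions = list(value_dic.values())
--     length = set()
--
--     for position in positions:
--
--         length.add(len(position))
--         check.add(connected(position))
--
--         if False in check or len(length) != 1:
--
--             return False
--             break
--
--     return True
-- ===== SOURCE B (Python) =====
-- def equidivision(grid):
--     # BFS flood fill per value-group: O(total cells) instead of A's repeated full scans.
--     cells = {}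
--     for i, row in enumerate(grid):
--         for j, v in enumerate(row):
--             cells.setdefault(v, []).append((i, j))
--     groups = list(cells.values())
--     if not groups:
--         return True
--     size = len(groups[0])
--     for g in groups:
--         if len(g) != size:
--             return False
--         pts = set(g)
--         seen = {g[0]}
--         stack = [g[0]]
--         while stack:
--             (x, y) = stack.pop()
--             for nb in ((x + 1, y), (x - 1, y), (x, y + 1), (x, y - 1)):
--                 if nb in pts and nb not in seen:
--                     seen.add(nb)
--                     stack.append(nb)
--         if len(seen) != size:
--             return False
--     return True
-- ===== Notes on version B (the rewrite author's own statement) =====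
-- stated objective: faster
-- what changed: Replaces A's per-region while-loop (which rebuilds the whole neighbour set of the connected part and rescans all remaining points on every single accretion) by a one-pass value->cells grouping plus a frontier BFS flood fill per region with a visited set.
import Mathlib
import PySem

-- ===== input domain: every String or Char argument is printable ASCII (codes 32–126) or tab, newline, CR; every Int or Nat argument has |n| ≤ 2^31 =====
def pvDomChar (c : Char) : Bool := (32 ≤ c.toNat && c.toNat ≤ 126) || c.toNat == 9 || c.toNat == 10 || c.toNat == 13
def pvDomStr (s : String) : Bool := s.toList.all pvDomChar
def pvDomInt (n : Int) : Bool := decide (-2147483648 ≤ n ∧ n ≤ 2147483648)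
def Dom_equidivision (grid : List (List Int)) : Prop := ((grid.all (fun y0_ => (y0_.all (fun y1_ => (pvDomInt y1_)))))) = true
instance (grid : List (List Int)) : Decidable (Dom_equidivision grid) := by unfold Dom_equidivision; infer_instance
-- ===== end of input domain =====

-- B replaces A's per-region repeated full-set scans by a frontier BFS flood fill per region (objective: faster).
-- Note: Python A pops/iterates hash sets whose order is unmodelled; A's Boolean result is order-independent
-- (it only tests region connectivity), so the ports fix first-insertion order.

-- ===== PORT A =====
-- termination helper for the while-loop of connected(): each iteration removes one member
theorem pvDiscardLt {s : PySem.Set (Int × Int)} {x : Int × Int} (hx : x ∈ s) :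
    (PySem.Set.discard s x).length < s.length := by
  have : ∃ y ∈ s, ¬((fun y => !y == x) y = true) := ⟨x, hx, by simp⟩
  simpa [PySem.Set.discard] using List.length_filter_lt_length_iff_exists.mpr this

-- groups(grid): for row in grid: for number in range(len(row)): index=(counter,number); … ; counter += 1
-- (range(len(row)) with row[number] reads exactly the pairs of enumerate(row); counter is the Int accumulator st.2)
def pvGroupsA (grid : List (List Int)) : PySem.Dict Int (PySem.Set (Int × Int)) :=
  (grid.foldl (fun (st : PySem.Dict Int (PySem.Set (Int × Int)) × Int) row =>
      ((PySem.List.enumerate row 0).foldl (fun pos nv =>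
          let index : Int × Int := (st.2, nv.1)
          if pos.contains nv.2 then
            -- position[row[number]].add(index): mutates the set in place, dict order kept
            pos.insert nv.2 (PySem.Set.add (pos.getD nv.2 PySem.Set.empty) index)
          else
            -- position[row[number]] = position.get(index, {index}): index is an (int,int) pair,
            -- the keys are ints, so the lookup never hits — exact default {index}
            pos.insert nv.2 (PySem.Set.ofList [index])) st.1,
       st.2 + 1))
    (PySem.Dict.empty, (0 : Int))).1

-- check = neighbours of all points of connected (the first inner for-loop of connected())
def pvCheckOf (conn : PySem.Set (Int × Int)) : PySem.Set (Int × Int) :=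
  conn.foldl (fun ch p =>
    PySem.Set.add (PySem.Set.add (PySem.Set.add (PySem.Set.add ch (p.1 + 1, p.2)) (p.1 - 1, p.2)) (p.1, p.2 + 1)) (p.1, p.2 - 1))
    PySem.Set.empty

-- the while-loop of connected(): scan points for the first one in check (break), add it;
-- then points.remove(point) — point is the found one, or the last iterated when none matched
def pvConnLoop (original : Nat) (conn : PySem.Set (Int × Int)) (points : PySem.Set (Int × Int)) : Bool :=
  if hp : points = [] then conn.length == original
  else
    -- check = neighbours of connected (pvCheckOf); then scan points for the first point in check
    match hf : points.find? (fun p => PySem.Set.contains (pvCheckOf conn) p) with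
    | some p => pvConnLoop original (PySem.Set.add conn p) (PySem.Set.discard points p)
    | none => pvConnLoop original conn (PySem.Set.discard points (points.getLast hp))
termination_by points.length
decreasing_by
  · exact pvDiscardLt (List.mem_of_find?_eq_some hf)
  · exact pvDiscardLt (List.getLast_mem hp)

def pvConnectedA (points : PySem.Set (Int × Int)) : Bool :=
  match points with
  | [] => false  -- unreachable in equidivision: points.pop() on an empty set would raise KeyError
  | p0 :: rest => pvConnLoop (p0 :: rest).length (PySem.Set.ofList [p0]) rest

-- the for-loop of equidivision() over positions, carrying the check and length sets
def pvEqLoop (positions : List (PySem.Set (Int × Int))) (check : PySem.Set Bool) (length : PySem.Set Int) : Bool :=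
  match positions with
  | [] => true
  | pos :: rest =>
    let length' := PySem.Set.add length (PySem.Set.len pos)
    let check' := PySem.Set.add check (pvConnectedA pos)
    if PySem.Set.contains check' false || PySem.Set.len length' ≠ 1 then false
    else pvEqLoop rest check' length'

def equidivision (grid : List (List Int)) : Bool :=
  pvEqLoop (pvGroupsA grid).values PySem.Set.empty PySem.Set.empty

-- ===== PORT B =====
-- the 4-neighbour tuple of Source B
def pvNbrs (p : Int × Int) : List (Int × Int) :=
  [(p.1 + 1, p.2), (p.1 - 1, p.2), (p.1, p.2 + 1), (p.1, p.2 - 1)]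

-- cells.setdefault(v, []).append((i, j))
def pvCells (grid : List (List Int)) : PySem.Dict Int (List (Int × Int)) :=
  (PySem.List.enumerate grid 0).foldl (fun d ir =>
      (PySem.List.enumerate ir.2 0).foldl (fun d jv =>
        d.modify jv.2 [] (fun l => l ++ [(ir.1, jv.1)])) d)
    PySem.Dict.empty

-- one frontier point: for nb in (...): if nb in pts and nb not in seen: seen.add(nb); nxt.append(nb)
def pvBStep (pts : PySem.Set (Int × Int)) (st : PySem.Set (Int × Int) × List (Int × Int)) (q : Int × Int) :
    PySem.Set (Int × Int) × List (Int × Int) :=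
  (pvNbrs q).foldl (fun st nb =>
    if PySem.Set.contains pts nb && !PySem.Set.contains st.1 nb then (PySem.Set.add st.1 nb, st.2 ++ [nb])
    else st) st

-- the while-frontier loop of Source B; fuel is a totality guard only: |pts|+1 rounds always suffice,
-- since every round with a nonempty next frontier strictly grows seen ⊆ set(pts)
def pvRounds (fuel : Nat) (pts : PySem.Set (Int × Int)) (seen : PySem.Set (Int × Int))
    (frontier : List (Int × Int)) : PySem.Set (Int × Int) :=
  match fuel with
  | 0 => seen
  | fuel + 1 =>
    match frontier with
    | [] => seen
    | _ :: _ =>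
      let st := frontier.foldl (pvBStep pts) (seen, [])
      pvRounds fuel pts st.1 st.2

-- the for-loop of Source B over the groups
def pvBLoop (gs : List (List (Int × Int))) (size : Nat) : Bool :=
  match gs with
  | [] => true
  | g :: rest =>
    if g.length ≠ size then false
    else
      match g with
      | [] => false  -- unreachable: cells' value lists are nonempty (g[0] would raise IndexError)
      | p0 :: _ =>
        let pts := PySem.Set.ofList g
        let seen := pvRounds (g.length + 1) pts (PySem.Set.ofList [p0]) [p0]
        if seen.length ≠ size then false else pvBLoop rest size

def equidivision_alt (grid : List (List Int)) : Bool :=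
  let groups := (pvCells grid).values
  match groups with
  | [] => true
  | g0 :: _ => pvBLoop groups g0.length

-- ===== PRECONDITION & SPEC =====
def Spec_equidivision (grid : List (List Int)) (out : Bool) : Prop := out = equidivision_alt grid
instance (grid : List (List Int)) (out : Bool) : Decidable (Spec_equidivision grid out) := by unfold Spec_equidivision; infer_instance

-- ===== CLAIM (what is proved, stated in full; the proofs are below) =====
def Claim_equal_equidivision : Prop := ∀ (grid : List (List Int)), Dom_equidivision grid → Spec_equidivision grid (equidivision grid)

-- ===== LEMMAS AND PROOFS =====

-- reachability inside the point list U by 4-neighbour steps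
def pvReach (U : List (Int × Int)) (a b : Int × Int) : Prop :=
  Relation.ReflTransGen (fun u v => v ∈ U ∧ v ∈ pvNbrs u) a b

-- y is in A's check set iff it is a 4-neighbour of some connected point
theorem pvMem_foldl_update (l : List (Int × Int)) (init : PySem.Set (Int × Int)) (y : Int × Int) :
    y ∈ l.foldl (fun ch p => PySem.Set.update ch (pvNbrs p)) init ↔ y ∈ init ∨ ∃ p ∈ l, y ∈ pvNbrs p := by
  induction l generalizing init with
  | nil => simp
  | cons q t ih =>
    simp only [List.foldl_cons, ih, PySem.Set.mem_update, List.mem_cons]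
    constructor
    · rintro (⟨h | h⟩ | ⟨p, hp, hy⟩)
      · exact Or.inl h
      · exact Or.inr ⟨q, Or.inl rfl, h⟩
      · exact Or.inr ⟨p, Or.inr hp, hy⟩
    · rintro (h | ⟨p, hp | hp, hy⟩)
      · exact Or.inl (Or.inl h)
      · exact Or.inl (Or.inr (hp ▸ hy))
      · exact Or.inr ⟨p, hp, hy⟩

theorem pvMem_checkOf (conn : PySem.Set (Int × Int)) (y : Int × Int) :
    y ∈ pvCheckOf conn ↔ ∃ p ∈ conn, y ∈ pvNbrs p := by
  have hfun : (fun (ch : PySem.Set (Int × Int)) (p : Int × Int) =>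
      PySem.Set.add (PySem.Set.add (PySem.Set.add (PySem.Set.add ch (p.1 + 1, p.2)) (p.1 - 1, p.2)) (p.1, p.2 + 1)) (p.1, p.2 - 1))
      = fun ch p => PySem.Set.update ch (pvNbrs p) := by
    funext ch p
    simp [pvNbrs, PySem.Set.update]
  rw [pvCheckOf, hfun, pvMem_foldl_update]
  simp [PySem.Set.empty]

-- monotonicity of reachability in the ambient point list
theorem pvReach_mono {U V : List (Int × Int)} (h : ∀ x ∈ U, x ∈ V) {a b : Int × Int} :
    pvReach U a b → pvReach V a b := by
  intro hr
  induction hr with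
  | refl => exact Relation.ReflTransGen.refl
  | tail _ hstep ih => exact ih.tail ⟨h _ hstep.1, hstep.2⟩

-- a path leaving conn crosses its boundary
theorem pvReach_boundary {U conn : List (Int × Int)} {b : Int × Int} (hb : b ∉ conn) :
    ∀ {a : Int × Int}, pvReach U a b → a ∈ conn →
      ∃ u ∈ conn, ∃ v, v ∈ U ∧ v ∉ conn ∧ v ∈ pvNbrs u := by
  intro a h
  induction h using Relation.ReflTransGen.head_induction_on with
  | refl => exact fun ha => absurd ha hb
  | @head a' c hstep _ ih =>
    intro ha
    by_cases hc : c ∈ conn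
    · exact ih hc
    · exact ⟨a', ha, c, hstep.1, hc, hstep.2⟩

-- discarding a member of a nodup set shrinks it by exactly one
theorem pvDiscardLen {s : PySem.Set (Int × Int)} {x : Int × Int} (hnd : s.Nodup) (hx : x ∈ s) :
    (PySem.Set.discard s x).length + 1 = s.length := by
  have he : PySem.Set.discard s x = s.erase x := by
    rw [List.Nodup.erase_eq_filter hnd]
    rfl
  rw [he, List.length_erase_of_mem hx]
  have : 1 ≤ s.length := List.length_pos_of_mem hx
  omega

-- a run of the while-loop that reports success saw at least `o` points
theorem pvConnLoop_le : ∀ (n o : Nat) (conn pts : PySem.Set (Int × Int)), pts.length ≤ n →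
    pvConnLoop o conn pts = true → o ≤ conn.length + pts.length := by
  intro n
  induction n with
  | zero =>
    intro o conn pts hn h
    have hpts : pts = [] := List.eq_nil_of_length_eq_zero (Nat.le_zero.mp hn)
    rw [pvConnLoop, dif_pos hpts] at h
    simp_all
  | succ n ih =>
    intro o conn pts hn h
    by_cases hpts : pts = []
    · rw [pvConnLoop, dif_pos hpts] at h
      simp_all
    · rw [pvConnLoop, dif_neg hpts] at h
      split at h
      · rename_i p hf
        have hmem : p ∈ pts := List.mem_of_find?_eq_some hf
        have hlt := pvDiscardLt hmem
        have hadd : (PySem.Set.add conn p).length ≤ conn.length + 1 := by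
          rw [PySem.Set.add_eq_ite]
          split <;> simp
        have := ih o (PySem.Set.add conn p) (PySem.Set.discard pts p) (by omega) h
        omega
      · have hmem : pts.getLast hpts ∈ pts := List.getLast_mem hpts
        have hlt := pvDiscardLt hmem
        have := ih o conn (PySem.Set.discard pts (pts.getLast hpts)) (by omega) h
        omega

-- completeness of A's loop: while every outstanding point is reachable from conn, every round adjoins one
theorem pvConnLoop_comp : ∀ (n : Nat) (conn pts : PySem.Set (Int × Int)), pts.length ≤ n →
    conn ≠ [] → conn.Nodup → pts.Nodup → (∀ x ∈ conn, x ∉ pts) →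
    (∀ p ∈ pts, ∃ c ∈ conn, pvReach (conn ++ pts) c p) →
    pvConnLoop (conn.length + pts.length) conn pts = true := by
  intro n
  induction n with
  | zero =>
    intro conn pts hn _ _ _ _ _
    have hpts : pts = [] := List.eq_nil_of_length_eq_zero (Nat.le_zero.mp hn)
    subst hpts
    rw [pvConnLoop, dif_pos rfl]
    simp
  | succ n ih =>
    intro conn pts hn hcne hcnd hpnd hdisj hreach
    by_cases hpts : pts = []
    · subst hpts
      rw [pvConnLoop, dif_pos rfl]
      simp
    · -- some outstanding point is adjacent to conn, so find? succeeds
      obtain ⟨p1, hp1⟩ := List.exists_mem_of_ne_nil pts hpts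
      obtain ⟨c1, hc1, hrc⟩ := hreach p1 hp1
      have hp1nc : p1 ∉ conn := fun hc => hdisj p1 hc hp1
      obtain ⟨u, hu, v, hvU, hvnc, hvnb⟩ := pvReach_boundary hp1nc hrc hc1
      have hvpts : v ∈ pts := by
        rcases List.mem_append.mp hvU with h | h
        · exact absurd h hvnc
        · exact h
      have hvcheck : PySem.Set.contains (pvCheckOf conn) v = true := by
        rw [PySem.Set.contains_iff, pvMem_checkOf]
        exact ⟨u, hu, hvnb⟩
      rw [pvConnLoop, dif_neg hpts]
      split
      · rename_i p hf
        -- the found point p is in pts and adjacent to conn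
        have hppts : p ∈ pts := List.mem_of_find?_eq_some hf
        have hpch : p ∈ pvCheckOf conn := by
          have := List.find?_some hf
          rwa [PySem.Set.contains_iff] at this
        obtain ⟨u', hu', hnb'⟩ := (pvMem_checkOf conn p).mp hpch
        have hpnc : p ∉ conn := fun hc => hdisj p hc hppts
        -- new state
        have hconn' : PySem.Set.add conn p = conn ++ [p] := PySem.Set.add_of_not_mem hpnc
        have hlen : (PySem.Set.discard pts p).length + 1 = pts.length := pvDiscardLen hpnd hppts
        have hsum : conn.length + pts.length = (PySem.Set.add conn p).length + (PySem.Set.discard pts p).length := by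
          rw [hconn']
          simp
          omega
        rw [hsum]
        apply ih
        · omega
        · rw [hconn']; simp
        · rw [hconn']
          exact List.Nodup.append hcnd (List.nodup_singleton p) (by simpa using hpnc)
        · exact PySem.Set.nodup_discard pts p hpnd
        · intro x hx hx'
          rw [hconn', List.mem_append] at hx
          rw [PySem.Set.mem_discard] at hx'
          rcases hx with hx | hx
          · exact hdisj x hx hx'.1
          · simp at hx
            exact hx'.2 hx
        · intro q hq
          rw [PySem.Set.mem_discard] at hq
          obtain ⟨c, hc, hr⟩ := hreach q hq.1
          have hU : ∀ x ∈ conn ++ pts, x ∈ PySem.Set.add conn p ++ PySem.Set.discard pts p := by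
            intro x hx
            rw [hconn', List.mem_append, List.mem_append]
            rcases List.mem_append.mp hx with hx | hx
            · exact Or.inl (Or.inl hx)
            · by_cases hxp : x = p
              · exact Or.inl (Or.inr (by simp [hxp]))
              · exact Or.inr (by rw [PySem.Set.mem_discard]; exact ⟨hx, hxp⟩)
          refine ⟨c, ?_, pvReach_mono hU hr⟩
          rw [hconn']
          exact List.mem_append.mpr (Or.inl hc)
      · -- find? = none is impossible: v would have been found
        rename_i hf
        rw [List.find?_eq_none] at hf
        exact absurd hvcheck (hf v hvpts)

-- soundness of A's loop: success means everything was reachable from the seed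
theorem pvConnLoop_sound (S : List (Int × Int)) (s0 : Int × Int) :
    ∀ (n : Nat) (conn pts : PySem.Set (Int × Int)), pts.length ≤ n →
    pvConnLoop (conn.length + pts.length) conn pts = true →
    conn.Nodup → pts.Nodup → (∀ x ∈ conn, x ∉ pts) →
    (∀ x ∈ pts, x ∈ S) →
    (∀ c ∈ conn, pvReach S s0 c) →
    ∀ p, (p ∈ conn ∨ p ∈ pts) → pvReach S s0 p := by
  intro n
  induction n with
  | zero =>
    intro conn pts hn _ _ _ _ _ hcr p hp
    have hpts : pts = [] := List.eq_nil_of_length_eq_zero (Nat.le_zero.mp hn)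
    subst hpts
    rcases hp with hp | hp
    · exact hcr p hp
    · simp at hp
  | succ n ih =>
    intro conn pts hn h hcnd hpnd hdisj hptsS hcr p hp
    by_cases hpts : pts = []
    · subst hpts
      rcases hp with hp | hp
      · exact hcr p hp
      · simp at hp
    · rw [pvConnLoop, dif_neg hpts] at h
      split at h
      · rename_i r hf
        have hrpts : r ∈ pts := List.mem_of_find?_eq_some hf
        have hrch : r ∈ pvCheckOf conn := by
          have := List.find?_some hf
          rwa [PySem.Set.contains_iff] at this
        obtain ⟨u, hu, hnb⟩ := (pvMem_checkOf conn r).mp hrch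
        have hrnc : r ∉ conn := fun hc => hdisj r hc hrpts
        have hrreach : pvReach S s0 r := (hcr u hu).tail ⟨hptsS r hrpts, hnb⟩
        have hconn' : PySem.Set.add conn r = conn ++ [r] := PySem.Set.add_of_not_mem hrnc
        have hlen : (PySem.Set.discard pts r).length + 1 = pts.length := pvDiscardLen hpnd hrpts
        have hsum : conn.length + pts.length = (PySem.Set.add conn r).length + (PySem.Set.discard pts r).length := by
          rw [hconn']; simp; omega
        rw [hsum] at h
        have hall := ih (PySem.Set.add conn r) (PySem.Set.discard pts r) (by omega) h
          (by rw [hconn']; exact List.Nodup.append hcnd (List.nodup_singleton r) (by simpa using hrnc))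
          (PySem.Set.nodup_discard pts r hpnd)
          (by
            intro x hx hx'
            rw [hconn', List.mem_append] at hx
            rw [PySem.Set.mem_discard] at hx'
            rcases hx with hx | hx
            · exact hdisj x hx hx'.1
            · simp at hx
              exact hx'.2 hx)
          (fun x hx => hptsS x (PySem.Set.mem_discard pts r x |>.mp hx).1)
          (by
            intro c hc
            rw [hconn', List.mem_append] at hc
            rcases hc with hc | hc
            · exact hcr c hc
            · simp at hc
              exact hc ▸ hrreach)
        rcases hp with hp | hp
        · exact hall p (Or.inl (by rw [hconn']; exact List.mem_append.mpr (Or.inl hp)))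
        · by_cases hpr : p = r
          · exact hall p (Or.inl (by rw [hconn', hpr]; simp))
          · exact hall p (Or.inr (by rw [PySem.Set.mem_discard]; exact ⟨hp, hpr⟩))
      · -- a removal without adjoining can never recover the original count
        exfalso
        have hmem : pts.getLast hpts ∈ pts := List.getLast_mem hpts
        have hlen : (PySem.Set.discard pts (pts.getLast hpts)).length + 1 = pts.length := pvDiscardLen hpnd hmem
        have := pvConnLoop_le (PySem.Set.discard pts (pts.getLast hpts)).length _ conn _ le_rfl h
        omega

-- A's connected(points) is exactly: every point is 4-connected to the first one inside the list
theorem pvConnectedA_iff (p0 : Int × Int) (rest : List (Int × Int)) (hnd : (p0 :: rest).Nodup) :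
    pvConnectedA (p0 :: rest) = true ↔ ∀ p ∈ (p0 :: rest), pvReach (p0 :: rest) p0 p := by
  have hofl : PySem.Set.ofList [p0] = [p0] := rfl
  have hnd0 : rest.Nodup := (List.nodup_cons.mp hnd).2
  have hp0 : p0 ∉ rest := (List.nodup_cons.mp hnd).1
  constructor
  · intro h p hp
    rw [pvConnectedA, hofl] at h
    have hlen : (p0 :: rest).length = [p0].length + rest.length := by simp; omega
    rw [hlen] at h
    exact pvConnLoop_sound (p0 :: rest) p0 rest.length [p0] rest le_rfl h
      (List.nodup_singleton p0) hnd0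
      (by intro x hx; simp at hx; subst hx; exact hp0)
      (fun x hx => List.mem_cons_of_mem p0 hx)
      (by intro c hc; simp at hc; subst hc; exact Relation.ReflTransGen.refl)
      p (by simpa using hp)
  · intro h
    rw [pvConnectedA, hofl]
    have hlen : (p0 :: rest).length = [p0].length + rest.length := by simp; omega
    rw [hlen]
    apply pvConnLoop_comp rest.length [p0] rest le_rfl (by simp) (List.nodup_singleton p0) hnd0
    · intro x hx
      simp at hx
      subst hx
      exact hp0
    · intro p hp
      exact ⟨p0, by simp, h p (List.mem_cons_of_mem p0 hp)⟩

-- one frontier point of Source B: the inner fold appends exactly the fresh in-grid neighbours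
theorem pvBStepF : ∀ (ns : List (Int × Int)) (pts seen : PySem.Set (Int × Int)) (nxt : List (Int × Int)),
    ∃ new,
      ns.foldl (fun st nb =>
          if PySem.Set.contains pts nb && !PySem.Set.contains st.1 nb then (PySem.Set.add st.1 nb, st.2 ++ [nb])
          else st) (seen, nxt) = (seen ++ new, nxt ++ new) ∧
      (∀ x ∈ new, x ∈ pts ∧ x ∈ ns ∧ x ∉ seen) ∧
      (∀ x ∈ ns, x ∈ pts → x ∈ seen ++ new) ∧
      (seen.Nodup → (seen ++ new).Nodup) := by
  intro ns
  induction ns with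
  | nil => exact fun pts seen nxt => ⟨[], by simp⟩
  | cons nb t ih =>
    intro pts seen nxt
    simp only [List.foldl_cons]
    by_cases hc : PySem.Set.contains pts nb = true ∧ PySem.Set.contains seen nb = false
    · rw [if_pos (by rw [hc.1, hc.2]; rfl)]
      have hnbm : nb ∉ seen := by
        intro hm
        rw [(PySem.Set.contains_iff seen nb).mpr hm] at hc
        exact absurd hc.2 (by decide)
      have hadd : PySem.Set.add seen nb = seen ++ [nb] := PySem.Set.add_of_not_mem hnbm
      rw [hadd]
      obtain ⟨new', heq, hmem, hcov, hnd⟩ := ih pts (seen ++ [nb]) (nxt ++ [nb])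
      refine ⟨nb :: new', by rw [heq]; simp, ?_, ?_, ?_⟩
      · intro x hx
        rcases List.mem_cons.mp hx with hx | hx
        · subst hx
          exact ⟨(PySem.Set.contains_iff _ _).mp hc.1, by simp, hnbm⟩
        · obtain ⟨h1, h2, h3⟩ := hmem x hx
          exact ⟨h1, List.mem_cons_of_mem nb h2, fun hs => h3 (List.mem_append.mpr (Or.inl hs))⟩
      · intro x hx hxp
        rcases List.mem_cons.mp hx with hx | hx
        · subst hx; simp
        · have := hcov x hx hxp
          simpa using this
      · intro hs
        have : (seen ++ [nb]).Nodup := by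
          have hdis : ∀ a ∈ seen, ∀ b ∈ [nb], a ≠ b := by
            intro a ha b hb hab
            rw [List.mem_singleton] at hb
            subst hb
            exact hnbm (hab ▸ ha)
          exact List.nodup_append.mpr ⟨hs, List.nodup_singleton nb, hdis⟩
        simpa using hnd this
    · rw [if_neg (by
        intro hcc
        rcases Bool.and_eq_true _ _ |>.mp hcc with ⟨h1, h2⟩
        exact hc ⟨h1, by simpa using h2⟩)]
      obtain ⟨new', heq, hmem, hcov, hnd⟩ := ih pts seen nxt
      refine ⟨new', heq, ?_, ?_, hnd⟩
      · intro x hx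
        obtain ⟨h1, h2, h3⟩ := hmem x hx
        exact ⟨h1, List.mem_cons_of_mem nb h2, h3⟩
      · intro x hx hxp
        rcases List.mem_cons.mp hx with hx | hx
        · subst hx
          have h1 : PySem.Set.contains pts x = true := (PySem.Set.contains_iff pts x).mpr hxp
          have h2 : PySem.Set.contains seen x = true := by
            by_contra hfalse
            exact hc ⟨h1, by simpa using hfalse⟩
          exact List.mem_append.mpr (Or.inl ((PySem.Set.contains_iff seen x).mp h2))
        · exact hcov x hx hxp

-- one whole round of Source B's while-frontier loop
theorem pvRoundF : ∀ (F : List (Int × Int)) (pts seen : PySem.Set (Int × Int)) (nxt : List (Int × Int)),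
    ∃ new,
      F.foldl (pvBStep pts) (seen, nxt) = (seen ++ new, nxt ++ new) ∧
      (∀ x ∈ new, x ∈ pts ∧ (∃ q ∈ F, x ∈ pvNbrs q) ∧ x ∉ seen) ∧
      (∀ q ∈ F, ∀ x ∈ pvNbrs q, x ∈ pts → x ∈ seen ++ new) ∧
      (seen.Nodup → (seen ++ new).Nodup) := by
  intro F
  induction F with
  | nil => exact fun pts seen nxt => ⟨[], by simp⟩
  | cons q t ih =>
    intro pts seen nxt
    simp only [List.foldl_cons]
    obtain ⟨n1, heq1, hmem1, hcov1, hnd1⟩ := pvBStepF (pvNbrs q) pts seen nxt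
    rw [show pvBStep pts (seen, nxt) q = (seen ++ n1, nxt ++ n1) from heq1]
    obtain ⟨n2, heq2, hmem2, hcov2, hnd2⟩ := ih pts (seen ++ n1) (nxt ++ n1)
    refine ⟨n1 ++ n2, by rw [heq2]; simp, ?_, ?_, ?_⟩
    · intro x hx
      rcases List.mem_append.mp hx with hx | hx
      · obtain ⟨h1, h2, h3⟩ := hmem1 x hx
        exact ⟨h1, ⟨q, by simp, h2⟩, h3⟩
      · obtain ⟨h1, h2, h3⟩ := hmem2 x hx
        obtain ⟨q', hq', hnb'⟩ := h2
        exact ⟨h1, ⟨q', List.mem_cons_of_mem q hq', hnb'⟩,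
          fun hs => h3 (List.mem_append.mpr (Or.inl hs))⟩
    · intro q' hq' x hx hxp
      rcases List.mem_cons.mp hq' with hq' | hq'
      · subst hq'
        have := hcov1 x hx hxp
        rw [List.mem_append] at this
        rcases this with h | h
        · exact List.mem_append.mpr (Or.inl h)
        · exact List.mem_append.mpr (Or.inr (List.mem_append.mpr (Or.inl h)))
      · have := hcov2 q' hq' x hx hxp
        simpa using this
    · intro hs
      have := hnd2 (hnd1 hs)
      simpa using this

-- a round with an empty frontier (or no fuel) returns seen unchanged
theorem pvRounds_nil (fuel : Nat) (pts seen : PySem.Set (Int × Int)) :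
    pvRounds fuel pts seen [] = seen := by
  cases fuel <;> rfl

-- full characterisation of the BFS result: the set of points reachable from the seed
theorem pvRounds_spec (pts : PySem.Set (Int × Int)) (s0 : Int × Int) :
    ∀ (fuel : Nat) (seen : PySem.Set (Int × Int)) (frontier : List (Int × Int)),
    (∀ x ∈ seen, x ∈ pts) → seen.Nodup → (∀ x ∈ frontier, x ∈ seen) →
    s0 ∈ seen → (∀ x ∈ seen, pvReach pts s0 x) →
    (∀ x ∈ seen, x ∉ frontier → ∀ y ∈ pvNbrs x, y ∈ pts → y ∈ seen) →
    pts.length + 1 ≤ fuel + seen.length →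
    (pvRounds fuel pts seen frontier).Nodup ∧
    (∀ x ∈ pvRounds fuel pts seen frontier, x ∈ pts) ∧
    s0 ∈ pvRounds fuel pts seen frontier ∧
    (∀ x ∈ pvRounds fuel pts seen frontier, pvReach pts s0 x) ∧
    (∀ x ∈ pvRounds fuel pts seen frontier,
      ∀ y ∈ pvNbrs x, y ∈ pts → y ∈ pvRounds fuel pts seen frontier) := by
  intro fuel
  induction fuel with
  | zero =>
    intro seen frontier hsub hnd hfs hs0 hreach hclose hbound
    exfalso
    have : seen.length ≤ pts.length := (List.subperm_of_subset hnd hsub).length_le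
    omega
  | succ fuel ih =>
    intro seen frontier hsub hnd hfs hs0 hreach hclose hbound
    match frontier with
    | [] =>
      rw [pvRounds_nil]
      exact ⟨hnd, hsub, hs0, hreach, fun x hx => hclose x hx (by simp)⟩
    | q :: F' =>
      rw [pvRounds]
      obtain ⟨new, heq, hmem, hcov, hndn⟩ := pvRoundF (q :: F') pts seen []
      rw [heq]
      simp only [List.nil_append]
      -- properties of the grown seen
      have hsub' : ∀ x ∈ seen ++ new, x ∈ pts := by
        intro x hx
        rcases List.mem_append.mp hx with hx | hx
        · exact hsub x hx
        · exact (hmem x hx).1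
      have hreach' : ∀ x ∈ seen ++ new, pvReach pts s0 x := by
        intro x hx
        rcases List.mem_append.mp hx with hx | hx
        · exact hreach x hx
        · obtain ⟨h1, ⟨q', hq', hnb'⟩, _⟩ := hmem x hx
          exact (hreach q' (hfs q' hq')).tail ⟨h1, hnb'⟩
      have hclose' : ∀ x ∈ seen ++ new, x ∉ new → ∀ y ∈ pvNbrs x, y ∈ pts → y ∈ seen ++ new := by
        intro x hx hxn y hy hyp
        rcases List.mem_append.mp hx with hx | hx
        · by_cases hxf : x ∈ q :: F'
          · exact hcov x hxf y hy hyp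
          · exact List.mem_append.mpr (Or.inl (hclose x hx hxf y hy hyp))
        · exact absurd hx hxn
      match hnew : new with
      | [] =>
        rw [pvRounds_nil]
        simp only [List.append_nil]
        refine ⟨hnd, hsub, hs0, hreach, ?_⟩
        intro x hx y hy hyp
        have := hclose' x (by simpa using hx) (by simp) y hy hyp
        simpa using this
      | m :: new' =>
        apply ih
        · exact hsub'
        · exact hndn hnd
        · intro x hx
          exact List.mem_append.mpr (Or.inr hx)
        · exact List.mem_append.mpr (Or.inl hs0)
        · exact hreach'
        · exact hclose'
        · have : seen.length + 1 ≤ (seen ++ (m :: new')).length := by simp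
          simp only [List.length_append] at this ⊢
          omega

-- a set containing the seed and closed under in-grid neighbours contains everything reachable
theorem pvReach_subset_closed {g R : List (Int × Int)} {s0 : Int × Int} (hs0 : s0 ∈ R)
    (hclosed : ∀ x ∈ R, ∀ y ∈ pvNbrs x, y ∈ g → y ∈ R) :
    ∀ p, pvReach g s0 p → p ∈ R := by
  intro p hp
  induction hp with
  | refl => exact hs0
  | tail _ hstep ih => exact hclosed _ ih _ hstep.2 hstep.1

-- the two per-group tests coincide on a duplicate-free group
theorem pvGroup_eq (p0 : Int × Int) (rest : List (Int × Int)) (hnd : (p0 :: rest).Nodup) :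
    pvConnectedA (p0 :: rest) =
      ((pvRounds ((p0 :: rest).length + 1) (PySem.Set.ofList (p0 :: rest)) (PySem.Set.ofList [p0])
          [p0]).length == (p0 :: rest).length) := by
  have hofl : PySem.Set.ofList (p0 :: rest) = p0 :: rest := PySem.Set.ofList_eq_self_of_nodup _ hnd
  have hof1 : PySem.Set.ofList [p0] = [p0] := rfl
  rw [hofl, hof1]
  obtain ⟨Rnd, Rsub, Rs0, Rreach, Rclosed⟩ :=
    pvRounds_spec (p0 :: rest) p0 ((p0 :: rest).length + 1) [p0] [p0]
      (by intro x hx; rw [List.mem_singleton] at hx; subst hx; simp)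
      (List.nodup_singleton p0)
      (fun x hx => hx)
      (List.mem_singleton_self p0)
      (by intro x hx; rw [List.mem_singleton] at hx; subst hx; exact Relation.ReflTransGen.refl)
      (by intro x hx hxf; exact absurd hx hxf)
      (by simp)
  rw [Bool.eq_iff_iff, beq_iff_eq, pvConnectedA_iff p0 rest hnd]
  set R := pvRounds ((p0 :: rest).length + 1) (p0 :: rest) [p0] [p0] with hR
  constructor
  · intro h
    have hgR : ∀ x ∈ (p0 :: rest), x ∈ R := by
      intro x hx
      exact pvReach_subset_closed Rs0 (fun x hx y hy hyg => Rclosed x hx y hy hyg) x (h x hx)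
    have h1 : R.length ≤ (p0 :: rest).length := (List.subperm_of_subset Rnd Rsub).length_le
    have h2 : (p0 :: rest).length ≤ R.length := (List.subperm_of_subset hnd hgR).length_le
    omega
  · intro hlen p hp
    have hsp : R.Subperm (p0 :: rest) := List.subperm_of_subset Rnd Rsub
    have hperm : R.Perm (p0 :: rest) := hsp.perm_of_length_le (by omega)
    exact Rreach p (hperm.mem_iff.mpr hp)

-- A's for-loop over positions, after the first group fixed check = {True} and length = {s}
theorem pvEqLoop_true_iff : ∀ (gs : List (PySem.Set (Int × Int))) (s : Int),
    pvEqLoop gs [true] [s] = true ↔ ∀ g ∈ gs, pvConnectedA g = true ∧ PySem.Set.len g = s := by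
  intro gs
  induction gs with
  | nil => simp [pvEqLoop]
  | cons pos rest ih =>
    intro s
    rw [pvEqLoop]
    by_cases hc : pvConnectedA pos = true
    · by_cases hl : PySem.Set.len pos = s
      · have hlen' : PySem.Set.add [s] (PySem.Set.len pos) = [s] :=
          PySem.Set.add_of_mem (by rw [hl]; exact List.mem_singleton_self s)
        have hchk' : PySem.Set.add [true] (pvConnectedA pos) = [true] :=
          PySem.Set.add_of_mem (by rw [hc]; exact List.mem_singleton_self true)
        rw [hlen', hchk']
        rw [if_neg (by simp [PySem.Set.contains, PySem.Set.len])]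
        rw [ih]
        constructor
        · intro h g hg
          rcases List.mem_cons.mp hg with hg | hg
          · subst hg; exact ⟨hc, hl⟩
          · exact h g hg
        · intro h g hg
          exact h g (List.mem_cons_of_mem pos hg)
      · have hlen' : PySem.Set.add [s] (PySem.Set.len pos) = [s, PySem.Set.len pos] :=
          PySem.Set.add_of_not_mem (by
            intro hmem
            rw [List.mem_singleton] at hmem
            exact hl hmem)
        rw [hlen']
        rw [if_pos (by simp [PySem.Set.len])]
        simp only [Bool.false_eq_true, false_iff]
        intro h
        exact hl (h pos (List.mem_cons_self) ).2
    · have hchk' : PySem.Set.add [true] (pvConnectedA pos) = [true, false] := by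
        have : pvConnectedA pos = false := Bool.not_eq_true _ |>.mp hc
        rw [this]
        exact PySem.Set.add_of_not_mem (by simp)
      rw [hchk']
      rw [if_pos (by simp [PySem.Set.contains])]
      simp only [Bool.false_eq_true, false_iff]
      intro h
      exact hc (h pos (List.mem_cons_self)).1

-- the first iteration of A's loop seeds check and length
theorem pvEqLoop_start (g : PySem.Set (Int × Int)) (rest : List (PySem.Set (Int × Int))) :
    pvEqLoop (g :: rest) [] [] = true ↔
      (pvConnectedA g = true ∧ pvEqLoop rest [true] [PySem.Set.len g] = true) := by
  rw [pvEqLoop]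
  have hlen' : PySem.Set.add ([] : PySem.Set Int) (PySem.Set.len g) = [PySem.Set.len g] := rfl
  rw [hlen']
  by_cases hc : pvConnectedA g = true
  · have hchk' : PySem.Set.add ([] : PySem.Set Bool) (pvConnectedA g) = [true] := by rw [hc]; rfl
    rw [hchk', if_neg (by simp [PySem.Set.contains, PySem.Set.len])]
    simp [hc]
  · have : pvConnectedA g = false := Bool.not_eq_true _ |>.mp hc
    have hchk' : PySem.Set.add ([] : PySem.Set Bool) (pvConnectedA g) = [false] := by rw [this]; rfl
    rw [hchk', if_pos (by simp [PySem.Set.contains])]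
    simp [this]

-- Source B's loop over the groups
theorem pvBLoop_iff : ∀ (gs : List (List (Int × Int))), (∀ g ∈ gs, g.Nodup ∧ g ≠ []) → ∀ size : Nat,
    (pvBLoop gs size = true ↔ ∀ g ∈ gs, g.length = size ∧ pvConnectedA g = true) := by
  intro gs
  induction gs with
  | nil => simp [pvBLoop]
  | cons g rest ih =>
    intro hgood size
    have hg := hgood g (List.mem_cons_self)
    obtain ⟨p0, tail, hgt⟩ : ∃ p0 tail, g = p0 :: tail := by
      cases g with
      | nil => exact absurd rfl hg.2
      | cons a b => exact ⟨a, b, rfl⟩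
    subst hgt
    rw [pvBLoop]
    by_cases hsz : (p0 :: tail).length = size
    · subst hsz
      rw [if_neg (by simp)]
      have hconn := pvGroup_eq p0 tail hg.1
      by_cases hcn : pvConnectedA (p0 :: tail) = true
      · have hseen : (pvRounds ((p0 :: tail).length + 1) (PySem.Set.ofList (p0 :: tail))
            (PySem.Set.ofList [p0]) [p0]).length = (p0 :: tail).length :=
          beq_iff_eq.mp (hconn.symm.trans hcn)
        rw [if_neg (by rw [hseen]; simp)]
        rw [ih (fun g hg => hgood g (List.mem_cons_of_mem _ hg)) (p0 :: tail).length]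
        constructor
        · intro h g hgm
          rcases List.mem_cons.mp hgm with hgm | hgm
          · subst hgm; exact ⟨rfl, hcn⟩
          · exact h g hgm
        · intro h g hgm
          exact h g (List.mem_cons_of_mem _ hgm)
      · have hne : (pvRounds ((p0 :: tail).length + 1) (PySem.Set.ofList (p0 :: tail))
            (PySem.Set.ofList [p0]) [p0]).length ≠ (p0 :: tail).length := by
          intro heq
          apply hcn
          rw [hconn, beq_iff_eq]
          exact heq
        rw [if_pos hne]
        simp only [Bool.false_eq_true, false_iff]
        intro h
        exact hcn (h (p0 :: tail) (List.mem_cons_self)).2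
    · rw [if_pos hsz]
      simp only [Bool.false_eq_true, false_iff]
      intro h
      exact hsz (h (p0 :: tail) (List.mem_cons_self)).1

-- invariant for the grouping dicts: nodup keys, every stored index satisfies ok, value lists nodup and nonempty
def pvDInv (d : PySem.Dict Int (List (Int × Int))) (ok : Int × Int → Prop) : Prop :=
  d.keys.Nodup ∧ ∀ v : Int,
    (∀ x ∈ d.getD v [], ok x) ∧ (d.getD v []).Nodup ∧ (v ∈ d.keys → d.getD v [] ≠ [])

-- one cell: A's if/else on `v in position` is exactly B's setdefault-append when the index is fresh
theorem pvStepEq (d : PySem.Dict Int (List (Int × Int))) (v : Int) (idx : Int × Int)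
    (h : idx ∉ d.getD v []) :
    (if d.contains v then d.insert v (PySem.Set.add (d.getD v PySem.Set.empty) idx)
     else d.insert v (PySem.Set.ofList [idx])) = d.modify v [] (fun l => l ++ [idx]) := by
  have hmod : d.modify v [] (fun l => l ++ [idx]) = d.insert v (d.getD v [] ++ [idx]) := rfl
  by_cases hc : d.contains v = true
  · rw [if_pos hc, hmod]
    have : PySem.Set.add (d.getD v PySem.Set.empty) idx = d.getD v [] ++ [idx] :=
      PySem.Set.add_of_not_mem h
    rw [this]
  · rw [if_neg hc, hmod, PySem.Dict.getD_of_not_contains d [] (Bool.not_eq_true _ |>.mp hc)]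
    rfl

-- the invariant survives one append, with the bound advanced past the new index
theorem pvStepInv (d : PySem.Dict Int (List (Int × Int))) (v : Int) (idx : Int × Int)
    (ok ok' : Int × Int → Prop) (hidx : ok' idx) (himp : ∀ x, ok x → ok' x) (hfresh : ¬ ok idx)
    (h : pvDInv d ok) : pvDInv (d.modify v [] (fun l => l ++ [idx])) ok' := by
  obtain ⟨hkeys, hvals⟩ := h
  constructor
  · rw [PySem.Dict.keys_modify]
    by_cases hc : d.contains v = true
    · rw [PySem.Dict.keys_insert_of_contains d _ hc]
      exact hkeys
    · rw [PySem.Dict.keys_insert_of_not_contains d _ (Bool.not_eq_true _ |>.mp hc)]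
      have hnv : v ∉ d.keys := fun hm => hc ((PySem.Dict.contains_iff_mem_keys d v).mpr hm)
      exact List.nodup_append.mpr ⟨hkeys, List.nodup_singleton v,
        fun a ha b hb hab => hnv ((List.mem_singleton.mp hb ▸ hab) ▸ ha)⟩
  · intro v'
    obtain ⟨hok, hnd, hne⟩ := hvals v'
    rw [PySem.Dict.getD_modify]
    by_cases hv : v' = v
    · rw [if_pos hv]
      subst hv
      refine ⟨?_, ?_, fun _ => by simp⟩
      · intro x hx
        rcases List.mem_append.mp hx with hx | hx
        · exact himp x (hok x hx)
        · rw [List.mem_singleton] at hx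
          exact hx ▸ hidx
      · have hnin : idx ∉ d.getD v' [] := fun hm => hfresh (hok idx hm)
        exact List.nodup_append.mpr ⟨hnd, List.nodup_singleton idx,
          fun a ha b hb hab => hnin ((List.mem_singleton.mp hb ▸ hab) ▸ ha)⟩
    · rw [if_neg hv]
      refine ⟨fun x hx => himp x (hok x hx), hnd, ?_⟩
      intro hm
      apply hne
      rw [PySem.Dict.keys_modify] at hm
      by_cases hc : d.contains v = true
      · rwa [PySem.Dict.keys_insert_of_contains d _ hc] at hm
      · rw [PySem.Dict.keys_insert_of_not_contains d _ (Bool.not_eq_true _ |>.mp hc)] at hm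
        rcases List.mem_append.mp hm with hm | hm
        · exact hm
        · exact absurd (List.mem_singleton.mp hm) hv

-- the lexicographic bound on stored indices
def pvLex (c j : Int) (x : Int × Int) : Prop := x.1 < c ∨ (x.1 = c ∧ x.2 < j)

-- one row: A's inner loop equals B's inner loop, invariant carried across the row
theorem pvInnerEq (c : Int) : ∀ (row : List Int) (j0 : Int) (d : PySem.Dict Int (List (Int × Int))),
    pvDInv d (pvLex c j0) →
    ((PySem.List.enumerate row j0).foldl (fun pos nv =>
        if pos.contains nv.2 then pos.insert nv.2 (PySem.Set.add (pos.getD nv.2 PySem.Set.empty) (c, nv.1))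
        else pos.insert nv.2 (PySem.Set.ofList [(c, nv.1)])) d
      = (PySem.List.enumerate row j0).foldl (fun d jv => d.modify jv.2 [] (fun l => l ++ [(c, jv.1)])) d)
    ∧ pvDInv ((PySem.List.enumerate row j0).foldl
        (fun d jv => d.modify jv.2 [] (fun l => l ++ [(c, jv.1)])) d) (pvLex c (j0 + row.length)) := by
  intro row
  induction row with
  | nil =>
    intro j0 d h
    simpa [PySem.List.enumerate_nil] using h
  | cons a t ih =>
    intro j0 d h
    rw [PySem.List.enumerate_cons]
    simp only [List.foldl_cons]
    have hfresh : (c, j0) ∉ d.getD a [] := by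
      intro hm
      rcases (h.2 a).1 _ hm with hlt | ⟨_, hlt⟩ <;> simp at hlt
    have hstep := pvStepEq d a (c, j0) hfresh
    have hinv : pvDInv (d.modify a [] (fun l => l ++ [(c, j0)])) (pvLex c (j0 + 1)) := by
      apply pvStepInv d a (c, j0) (pvLex c j0) (pvLex c (j0 + 1))
      · exact Or.inr ⟨rfl, by omega⟩
      · intro x hx
        rcases hx with hx | hx
        · exact Or.inl hx
        · exact Or.inr ⟨hx.1, by omega⟩
      · intro hx
        rcases hx with hx | hx
        · simp at hx
        · have := hx.2
          simp at this
      · exact h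
    obtain ⟨heq, hinv'⟩ := ih (j0 + 1) _ hinv
    refine ⟨by rw [hstep, heq], ?_⟩
    have : j0 + 1 + (t.length : Int) = j0 + (a :: t).length := by simp; ring
    rwa [this] at hinv'

-- all rows: the two grouping folds build the same dict
theorem pvOuterEq : ∀ (grid : List (List Int)) (c : Int) (d : PySem.Dict Int (List (Int × Int))),
    pvDInv d (fun x => x.1 < c) →
    ((grid.foldl (fun (st : PySem.Dict Int (List (Int × Int)) × Int) row =>
        ((PySem.List.enumerate row 0).foldl (fun pos nv =>
            if pos.contains nv.2 then pos.insert nv.2 (PySem.Set.add (pos.getD nv.2 PySem.Set.empty) (st.2, nv.1))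
            else pos.insert nv.2 (PySem.Set.ofList [(st.2, nv.1)])) st.1,
         st.2 + 1)) (d, c)).1
      = (PySem.List.enumerate grid c).foldl (fun d ir =>
          (PySem.List.enumerate ir.2 0).foldl (fun d jv =>
            d.modify jv.2 [] (fun l => l ++ [(ir.1, jv.1)])) d) d)
    ∧ pvDInv ((PySem.List.enumerate grid c).foldl (fun d ir =>
          (PySem.List.enumerate ir.2 0).foldl (fun d jv =>
            d.modify jv.2 [] (fun l => l ++ [(ir.1, jv.1)])) d) d)
        (fun x => x.1 < c + grid.length) := by
  intro grid
  induction grid with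
  | nil =>
    intro c d h
    simpa [PySem.List.enumerate_nil] using h
  | cons row t ih =>
    intro c d h
    rw [PySem.List.enumerate_cons]
    simp only [List.foldl_cons]
    have hpre : pvDInv d (pvLex c 0) := by
      obtain ⟨hk, hv⟩ := h
      refine ⟨hk, fun v => ⟨fun x hx => Or.inl ((hv v).1 x hx), (hv v).2.1, (hv v).2.2⟩⟩
    obtain ⟨heq, hinv⟩ := pvInnerEq c row 0 d hpre
    have hinv' : pvDInv ((PySem.List.enumerate row 0).foldl
        (fun d jv => d.modify jv.2 [] (fun l => l ++ [(c, jv.1)])) d) (fun x => x.1 < c + 1) := by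
      obtain ⟨hk, hv⟩ := hinv
      refine ⟨hk, fun v => ⟨?_, (hv v).2.1, (hv v).2.2⟩⟩
      intro x hx
      rcases (hv v).1 x hx with hlt | ⟨heq', _⟩
      · omega
      · omega
    obtain ⟨heq2, hinv2⟩ := ih (c + 1) _ hinv'
    constructor
    · rw [heq]
      exact heq2
    · have : c + 1 + (t.length : Int) = c + (row :: t).length := by simp; ring
      rwa [this] at hinv2

theorem pvDInv_empty : pvDInv PySem.Dict.empty (fun x => x.1 < 0) := by
  refine ⟨?_, ?_⟩
  · exact PySem.Dict.nodup_keys_empty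
  · intro v
    rw [PySem.Dict.getD_empty]
    refine ⟨by simp, List.nodup_nil, ?_⟩
    intro hm
    rw [PySem.Dict.keys_empty] at hm
    simp at hm

-- groups() and the setdefault/append grouping build the very same dict
theorem pvGroups_eq (grid : List (List Int)) : pvGroupsA grid = pvCells grid :=
  (pvOuterEq grid 0 PySem.Dict.empty pvDInv_empty).1

-- every group is duplicate-free and nonempty
theorem pvCells_good (grid : List (List Int)) :
    ∀ g ∈ (pvCells grid).values, g.Nodup ∧ g ≠ [] := by
  obtain ⟨hk, hv⟩ := (pvOuterEq grid 0 PySem.Dict.empty pvDInv_empty).2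
  intro g hg
  have hvals : (pvCells grid).values = (pvCells grid).keys.map (fun k => (pvCells grid).getD k []) :=
    PySem.Dict.values_eq_map_keys _ hk []
  rw [hvals, List.mem_map] at hg
  obtain ⟨k, hkm, hgk⟩ := hg
  exact hgk ▸ ⟨(hv k).2.1, (hv k).2.2 hkm⟩

theorem pvMain (grid : List (List Int)) : equidivision grid = equidivision_alt grid := by
  have hgv : (pvGroupsA grid).values = (pvCells grid).values := by rw [pvGroups_eq]
  have hgood := pvCells_good grid
  rw [equidivision, equidivision_alt, hgv]
  rcases hv : (pvCells grid).values with _ | ⟨g0, rest⟩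
  · rfl
  · rw [hv] at hgood
    rw [Bool.eq_iff_iff]
    have hA : pvEqLoop (g0 :: rest) PySem.Set.empty PySem.Set.empty = true ↔
        (pvConnectedA g0 = true ∧ ∀ g ∈ rest, pvConnectedA g = true ∧ PySem.Set.len g = PySem.Set.len g0) := by
      rw [show (PySem.Set.empty : PySem.Set Bool) = [] from rfl,
          show (PySem.Set.empty : PySem.Set Int) = [] from rfl,
          pvEqLoop_start, pvEqLoop_true_iff]
    have hB : pvBLoop (g0 :: rest) g0.length = true ↔
        ∀ g ∈ (g0 :: rest), g.length = g0.length ∧ pvConnectedA g = true :=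
      pvBLoop_iff (g0 :: rest) hgood g0.length
    rw [hA, hB]
    have hcast : ∀ g : PySem.Set (Int × Int), PySem.Set.len g = PySem.Set.len g0 ↔ g.length = g0.length := by
      intro g
      rw [PySem.Set.len, PySem.Set.len]
      exact Nat.cast_inj
    constructor
    · rintro ⟨h0, hr⟩ g hg
      rcases List.mem_cons.mp hg with hg | hg
      · exact ⟨hg ▸ rfl, hg ▸ h0⟩
      · exact ⟨(hcast g).mp (hr g hg).2, (hr g hg).1⟩
    · intro h
      refine ⟨(h g0 (List.mem_cons_self)).2, ?_⟩
      intro g hg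
      have := h g (List.mem_cons_of_mem _ hg)
      exact ⟨this.2, (hcast g).mpr this.1⟩

-- ===== VERDICT (by name: the statement is the Claim_ definition above) =====
theorem equidivision_spec : Claim_equal_equidivision := by
  intro grid _
  exact pvMain grid
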